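-- pv_equiv track=rewrite | github.com/canalqb/teoremas | Teorema_de_Beck/teorema_beck_simulador.py | gerar_tabela_beck
-- ===== SOURCE A (Python) =====
-- def gerar_tabela_beck(n_max):
--     tabela = []
--
--     # Valores iniciais do "Esperado" baseados na árvore binária cheia
--     esperado = {0: 1, 1: 3, 2: 7}
--
--     for n in range(n_max + 1):
--         inicio = 2 ** n
--         fim = 2 ** (n + 1) - 1
--
--         # Definir o esperado com base na regra empírica:
--         if n in esperado:
--             valor_esperado = esperado[n]
--         else:
--             # Aparentemente, a partir de N=3, a fórmula muda
--             # Vamos usar uma regra derivada por aproximação: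
--             # esperado[n] = esperado[n-1] + 2*(2**(n-2))
--             valor_esperado = esperado[n-1] + 2 * (2 ** (n - 2))
--             esperado[n] = valor_esperado
--
--         tabela.append((n, inicio, valor_esperado, fim))
--
--     return tabela
-- ===== SOURCE B (Python) =====
-- def gerar_tabela_beck(n_max):
--     tabela = []
--     for n in range(n_max + 1):
--         valor_esperado = 1 if n == 0 else 3 if n == 1 else 2 ** n + 3
--         tabela.append((n, 2 ** n, valor_esperado, 2 ** (n + 1) - 1))
--     return tabela
-- ===== Notes on version B (the rewrite author's own statement) =====
-- stated objective: simpler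
-- what changed: Replaces the memoized recurrence (a growing dict of previously computed 'esperado' values, each row reading the previous row's entry) with the closed form 2**n + 3 for n >= 2 (1 and 3 for n = 0, 1), computed independently per row with no dictionary state.
import Mathlib
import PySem

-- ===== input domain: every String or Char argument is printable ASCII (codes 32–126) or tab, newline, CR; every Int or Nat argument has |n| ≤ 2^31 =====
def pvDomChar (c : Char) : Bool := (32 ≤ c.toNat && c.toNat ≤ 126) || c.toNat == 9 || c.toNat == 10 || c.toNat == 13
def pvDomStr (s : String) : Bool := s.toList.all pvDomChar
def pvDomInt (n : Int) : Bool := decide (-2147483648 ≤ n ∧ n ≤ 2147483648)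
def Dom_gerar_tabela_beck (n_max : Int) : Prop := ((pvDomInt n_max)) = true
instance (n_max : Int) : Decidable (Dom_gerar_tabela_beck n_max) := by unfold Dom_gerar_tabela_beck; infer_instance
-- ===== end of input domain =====

-- B replaces A's memoized recurrence (a growing dict read back each row) with the per-row closed form 2^n + 3 for n ≥ 2 (1, 3 for n = 0, 1); return values proved equal for every n_max.

-- ===== PORT A =====
-- esperado = {0: 1, 1: 3, 2: 7}
def beckInit : PySem.Dict Int Int :=
  ((PySem.Dict.empty.insert 0 1).insert 1 3).insert 2 7

-- one iteration of A's loop body; state = (tabela, esperado)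
def beckStep (st : List (Int × Int × Int × Int) × PySem.Dict Int Int) (n : Int) :
    List (Int × Int × Int × Int) × PySem.Dict Int Int :=
  let inicio : Int := 2 ^ n.toNat
  let fim : Int := 2 ^ (n + 1).toNat - 1
  match st.2.get? n with
  | some v => (st.1 ++ [(n, inicio, v, fim)], st.2)
  | none =>
      -- esperado[n-1] is always present when this branch runs (n ≥ 3, filled in order); getD is its total form
      let v := st.2.getD (n - 1) 0 + 2 * 2 ^ (n - 2).toNat
      (st.1 ++ [(n, inicio, v, fim)], st.2.insert n v)

def gerar_tabela_beck (n_max : Int) : List (Int × Int × Int × Int) :=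
  ((PySem.List.pyRange 0 (n_max + 1) 1).foldl beckStep ([], beckInit)).1

-- ===== PORT B =====
def gerar_tabela_beck_alt (n_max : Int) : List (Int × Int × Int × Int) :=
  (PySem.List.pyRange 0 (n_max + 1) 1).map (fun n =>
    let valor_esperado : Int := if n = 0 then 1 else if n = 1 then 3 else 2 ^ n.toNat + 3
    (n, 2 ^ n.toNat, valor_esperado, 2 ^ (n + 1).toNat - 1))

-- ===== PRECONDITION & SPEC =====
def Spec_gerar_tabela_beck (n_max : Int) (out : List (Int × Int × Int × Int)) : Prop := out = gerar_tabela_beck_alt n_max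
instance (n_max : Int) (out : List (Int × Int × Int × Int)) : Decidable (Spec_gerar_tabela_beck n_max out) := by unfold Spec_gerar_tabela_beck; infer_instance

-- ===== CLAIM (what is proved, stated in full; the proofs are below) =====
def Claim_equal_gerar_tabela_beck : Prop := ∀ (n_max : Int), Dom_gerar_tabela_beck n_max → Spec_gerar_tabela_beck n_max (gerar_tabela_beck n_max)

-- ===== LEMMAS AND PROOFS =====
-- B's row function and the closed-form value, named for the proofs
def beckRow (n : Int) : Int × Int × Int × Int :=
  (n, 2 ^ n.toNat, if n = 0 then 1 else if n = 1 then 3 else 2 ^ n.toNat + 3, 2 ^ (n + 1).toNat - 1)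

def beckVal (n : Int) : Int := if n = 0 then 1 else if n = 1 then 3 else 2 ^ n.toNat + 3

-- invariant of A's loop: after processing 0..m-1 the table is the closed-form rows and the dict
-- holds exactly the keys 0 ≤ k < max m 3, each with the closed-form value
theorem beck_loop (m : Nat) : ∃ d : PySem.Dict Int Int,
    (PySem.List.pyRange 0 (m : Int) 1).foldl beckStep ([], beckInit)
      = ((PySem.List.pyRange 0 (m : Int) 1).map beckRow, d)
    ∧ (∀ k : Int, d.get? k = if 0 ≤ k ∧ k < max (m : Int) 3 then some (beckVal k) else none) := by
  induction m with
  | zero =>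
    refine ⟨beckInit, ?_, ?_⟩
    · simp [PySem.List.pyRange_one_eq_nil (by omega : (0:Int) ≤ 0)]
    · intro k
      by_cases h0 : k = 0
      · subst h0; norm_num [beckInit, PySem.Dict.get?_insert, beckVal]
      by_cases h1 : k = 1
      · subst h1; norm_num [beckInit, PySem.Dict.get?_insert, beckVal]
      by_cases h2 : k = 2
      · subst h2; norm_num [beckInit, PySem.Dict.get?_insert, beckVal]; decide
      · rw [if_neg (by omega)]
        simp [beckInit, PySem.Dict.get?_insert, PySem.Dict.get?_empty, h0, h1, h2]
  | succ m ih =>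
    obtain ⟨d, hfold, hget⟩ := ih
    have hrange : PySem.List.pyRange 0 ((m:Int) + 1) 1
        = PySem.List.pyRange 0 (m:Int) 1 ++ [(m:Int)] :=
      PySem.List.pyRange_one_succ_right (by omega)
    push_cast
    rw [hrange, List.foldl_append, hfold, List.map_append]
    simp only [List.foldl_cons, List.foldl_nil, List.map_cons, List.map_nil]
    by_cases hm : m < 3
    · -- dict lookup hits: m ∈ {0, 1, 2}
      refine ⟨d, ?_, ?_⟩
      · have : d.get? (m:Int) = some (beckVal (m:Int)) := by
          rw [hget]; simp; omega
        simp only [beckStep, this, beckRow, beckVal]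
      · intro k
        rw [hget]
        split_ifs <;> first | rfl | omega
    · -- lookup misses: m ≥ 3, A computes esperado[m-1] + 2*2^(m-2) = 2^m + 3
      have hnone : d.get? (m:Int) = none := by rw [hget]; simp; omega
      have hprev : d.get? ((m:Int) - 1) = some (beckVal ((m:Int) - 1)) := by
        rw [hget]; simp; omega
      refine ⟨d.insert (m:Int) (beckVal (m:Int)), ?_, ?_⟩
      · simp only [beckStep, hnone]
        have hv : d.getD ((m:Int) - 1) 0 + 2 * 2 ^ ((m:Int) - 2).toNat = beckVal (m:Int) := by
          rw [PySem.Dict.getD_eq_get?_getD, hprev, Option.getD_some]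
          simp only [beckVal]
          rw [if_neg (by omega), if_neg (by omega), if_neg (by omega), if_neg (by omega)]
          have h1 : ((m:Int) - 1).toNat = m - 1 := by omega
          have h2 : ((m:Int) - 2).toNat = m - 2 := by omega
          have h3 : (m:Int).toNat = m := by omega
          rw [h1, h2, h3]
          have e1 : m - 1 = (m - 2) + 1 := by omega
          have e2 : m = (m - 2) + 2 := by omega
          rw [e1]; nth_rewrite 3 [e2]
          ring
        rw [hv]
        simp only [beckRow, beckVal]
      · intro k
        rw [PySem.Dict.get?_insert, hget]
        split_ifs <;> first | rfl | omega | (subst_vars; rfl)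

-- ===== VERDICT (by name: the statement is the Claim_ definition above) =====
theorem gerar_tabela_beck_spec : Claim_equal_gerar_tabela_beck := by
  intro n_max _
  unfold Spec_gerar_tabela_beck
  by_cases h : n_max + 1 ≤ 0
  · simp [gerar_tabela_beck, gerar_tabela_beck_alt, PySem.List.pyRange_one_eq_nil h]
  · have hm : (((n_max + 1).toNat : Nat) : Int) = n_max + 1 := by omega
    obtain ⟨d, hfold, -⟩ := beck_loop (n_max + 1).toNat
    rw [hm] at hfold
    simp only [gerar_tabela_beck, gerar_tabela_beck_alt, hfold]
    rfl
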